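-- pv_equiv track=rewrite | github.com/Liang-Qiu/SVRNN-dialogues | interpretion.py | get_state_sents
-- ===== SOURCE A (Python) =====
-- def get_state_sents(state,
--                     converted_sents,
--                     converted_labels,
--                     last_n=3,
--                     sys_side=1):
--     state_sents = []
--     for i in range(len(converted_sents)):
--         for j, label in enumerate(converted_labels[i]):
--             if label == state:
--                 if converted_sents[i][j][sys_side]:
--                     last_n_sents = [
--                         converted_sents[i][j - i_last_n][sys_side]
--                         for i_last_n in range(last_n) if (j - i_last_n) >= 0
--                     ]
--                     last_n_sents = last_n_sents[::-1]
--                     last_n_sents = "\n ".join(last_n_sents)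
--
--                     state_sents.append(last_n_sents)
--     return state_sents
-- ===== SOURCE B (Python) =====
-- def get_state_sents(state,
--                     converted_sents,
--                     converted_labels,
--                     last_n=3,
--                     sys_side=1):
--     state_sents = []
--     for sents, labels in zip(converted_sents, converted_labels):
--         window = []
--         for j, label in enumerate(labels):
--             window.append(j)
--             if len(window) > last_n:
--                 window.pop(0)
--             if label == state and sents[j][sys_side]:
--                 state_sents.append("\n ".join(sents[k][sys_side] for k in window))
--     return state_sents
-- ===== Notes on version B (the rewrite author's own statement) =====
-- stated objective: alternative
-- what changed: B iterates zip(converted_sents, converted_labels) keeping a per-dialogue sliding window of the last-n positions incrementally (append, pop the oldest when it exceeds last_n) and joins the window's system sentences directly at each matching truthy label, instead of rebuilding the context at every match by a reverse-indexed comprehension over range(last_n) plus an explicit [::-1] reversal. (B returns via zip truncation where A raises IndexError on a missing label row; those inputs are outside Pre_).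
import Mathlib
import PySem

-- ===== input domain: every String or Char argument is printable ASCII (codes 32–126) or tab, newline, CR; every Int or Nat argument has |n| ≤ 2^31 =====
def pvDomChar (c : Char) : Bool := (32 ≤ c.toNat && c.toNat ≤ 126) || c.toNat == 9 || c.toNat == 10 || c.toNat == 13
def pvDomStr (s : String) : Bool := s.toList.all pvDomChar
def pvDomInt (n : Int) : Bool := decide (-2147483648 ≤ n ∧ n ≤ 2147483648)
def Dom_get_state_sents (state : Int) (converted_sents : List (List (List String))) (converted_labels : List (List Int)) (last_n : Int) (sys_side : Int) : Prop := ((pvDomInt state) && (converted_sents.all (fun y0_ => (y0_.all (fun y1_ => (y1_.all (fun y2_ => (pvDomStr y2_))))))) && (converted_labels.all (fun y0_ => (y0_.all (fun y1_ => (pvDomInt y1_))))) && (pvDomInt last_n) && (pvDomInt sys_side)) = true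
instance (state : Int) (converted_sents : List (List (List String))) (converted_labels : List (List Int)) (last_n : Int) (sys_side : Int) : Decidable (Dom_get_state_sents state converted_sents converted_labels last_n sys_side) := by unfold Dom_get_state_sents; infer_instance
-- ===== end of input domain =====

-- B keeps the last-n context as an incrementally maintained sliding window of positions
-- (append + pop oldest) over zip(sents, labels), instead of re-building it at every match by a
-- reverse-indexed comprehension plus an explicit reversal; same return values on Pre_
-- (no speed claim).

-- ===== PORT A =====
-- g abstracts the repeated Python expression converted_sents[i][·][sys_side]
-- (pyGetD is exact under Pre_, where every index A evaluates is in range).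
def pvStepA (state last_n : Int) (g : Int → String) (acc : List String) (jl : Int × Int) : List String :=
  if jl.2 == state then
    if g jl.1 != "" then
      -- last_n_sents = [g (j - k) for k in range(last_n) if (j - k) >= 0]; [::-1] is reverse; joined
      acc ++ [PySem.Str.join "\n "
        ((((PySem.List.pyRange 0 last_n 1).filter (fun k => decide (0 ≤ jl.1 - k))).map
          (fun k => g (jl.1 - k))).reverse)]
    else acc
  else acc

def get_state_sents (state : Int) (converted_sents : List (List (List String))) (converted_labels : List (List Int)) (last_n : Int) (sys_side : Int) : List String :=
  (PySem.List.pyRange 0 (converted_sents.length : Int) 1).foldl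
    (fun state_sents i =>
      (PySem.List.enumerate (PySem.List.pyGetD converted_labels i []) 0).foldl
        (pvStepA state last_n
          (fun t => PySem.List.pyGetD (PySem.List.pyGetD (PySem.List.pyGetD converted_sents i []) t []) sys_side ""))
        state_sents)
    []

-- ===== PORT B =====
-- fold state = (window of positions, state_sents); window.pop(0) is List.drop 1
-- (the window is nonempty there, having just been appended to).
def pvStepB (state last_n : Int) (g : Int → String) (st : List Int × List String) (jl : Int × Int) : List Int × List String :=
  let w0 := st.1 ++ [jl.1]
  let w := if (w0.length : Int) > last_n then w0.drop 1 else w0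
  (w, if jl.2 == state && g jl.1 != "" then
        st.2 ++ [PySem.Str.join "\n " (w.map g)]
      else st.2)

def get_state_sents_alt (state : Int) (converted_sents : List (List (List String))) (converted_labels : List (List Int)) (last_n : Int) (sys_side : Int) : List String :=
  (converted_sents.zip converted_labels).foldl
    (fun state_sents sl =>
      ((PySem.List.enumerate sl.2 0).foldl
        (pvStepB state last_n
          (fun t => PySem.List.pyGetD (PySem.List.pyGetD sl.1 t []) sys_side ""))
        ([], state_sents)).2)
    []

-- ===== PRECONDITION & SPEC =====
-- Pre_ is exactly the inputs on which Python A returns (A raises IndexError when a dialogue has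
-- no label row, or when a matching position — or, if its system sentence is truthy, a position
-- of its last-n window — has no sentence or no sys_side entry); it excludes no input A returns on.
def pvRowOk (state last_n sys_side : Int) (sents : List (List String)) (labels : List Int) : Bool :=
  decide (∀ j < labels.length, labels.getD j 0 = state →
    j < sents.length ∧
    PySem.Raise.InRange (sents.getD j []).length sys_side ∧
    (PySem.List.pyGetD (sents.getD j []) sys_side "" ≠ "" →
      ∀ k < j, (j : Int) - (k : Int) < last_n →
        PySem.Raise.InRange (sents.getD k []).length sys_side))

def Pre_get_state_sents (state : Int) (converted_sents : List (List (List String))) (converted_labels : List (List Int)) (last_n : Int) (sys_side : Int) : Prop :=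
  converted_sents.length ≤ converted_labels.length ∧
  ∀ i < converted_sents.length,
    pvRowOk state last_n sys_side (converted_sents.getD i []) (converted_labels.getD i []) = true
instance (state : Int) (converted_sents : List (List (List String))) (converted_labels : List (List Int)) (last_n : Int) (sys_side : Int) : Decidable (Pre_get_state_sents state converted_sents converted_labels last_n sys_side) := by unfold Pre_get_state_sents; infer_instance

def pvWitness_get_state_sents : Int × List (List (List String)) × List (List Int) × Int × Int :=
  (0, [[["a", "b"], ["c", "d"]]], [[1, 0]], 3, 1)

def Spec_get_state_sents (state : Int) (converted_sents : List (List (List String))) (converted_labels : List (List Int)) (last_n : Int) (sys_side : Int) (out : List String) : Prop := out = get_state_sents_alt state converted_sents converted_labels last_n sys_side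
instance (state : Int) (converted_sents : List (List (List String))) (converted_labels : List (List Int)) (last_n : Int) (sys_side : Int) (out : List String) : Decidable (Spec_get_state_sents state converted_sents converted_labels last_n sys_side out) := by unfold Spec_get_state_sents; infer_instance

-- ===== CLAIM (what is proved, stated in full; the proofs are below) =====
def Claim_equal_get_state_sents : Prop := ∀ (state : Int) (converted_sents : List (List (List String))) (converted_labels : List (List Int)) (last_n : Int) (sys_side : Int), Dom_get_state_sents state converted_sents converted_labels last_n sys_side → Pre_get_state_sents state converted_sents converted_labels last_n sys_side → Spec_get_state_sents state converted_sents converted_labels last_n sys_side (get_state_sents state converted_sents converted_labels last_n sys_side)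

-- ===== LEMMAS AND PROOFS =====

-- the sliding window of positions after processing positions 0..s-1
def pvIWin (last_n : Int) (s : Int) : List Int :=
  PySem.List.pyRange (max 0 (s - max last_n 0)) s 1

lemma pvIWin_zero (last_n : Int) : pvIWin last_n 0 = [] := by
  unfold pvIWin
  rw [PySem.List.pyRange_one_eq_nil (by omega)]

-- the comprehension's filter keeps exactly range(min last_n (s+1))
lemma pvFilt (n s : Int) (hs : 0 ≤ s) :
    (PySem.List.pyRange 0 n 1).filter (fun k => decide (0 ≤ s - k))
      = PySem.List.pyRange 0 (min n (s + 1)) 1 := by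
  rcases (by omega : n ≤ s + 1 ∨ s + 1 < n) with h | h
  · rw [min_eq_left h, List.filter_eq_self.2]
    intro a ha
    rw [PySem.List.mem_pyRange_one] at ha
    simp; omega
  · rw [min_eq_right (by omega : s + 1 ≤ n),
        PySem.List.pyRange_one_append 0 (s+1) n (by omega) (by omega), List.filter_append,
        List.filter_eq_self.2, List.filter_eq_nil_iff.2, List.append_nil]
    · intro a ha
      rw [PySem.List.mem_pyRange_one] at ha
      simp; omega
    · intro a ha
      rw [PySem.List.mem_pyRange_one] at ha
      simp; omega

-- reversing the descending-indexed map gives an ascending pyRange map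
lemma pvRevMap (g : Int → String) (s : Int) :
    ∀ (mn : Nat), (mn : Int) ≤ s + 1 →
    (((PySem.List.pyRange 0 (mn : Int) 1).map (fun k => g (s - k))).reverse
      = (PySem.List.pyRange (s + 1 - (mn : Int)) (s + 1) 1).map g) := by
  intro mn
  induction mn with
  | zero =>
    intro _
    simp only [Nat.cast_zero]
    rw [PySem.List.pyRange_one_eq_nil (le_refl 0), show s + 1 - (0 : Int) = s + 1 by ring,
        PySem.List.pyRange_one_eq_nil (le_refl (s + 1))]
    rfl
  | succ m ih =>
    intro hm
    push_cast at hm ⊢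
    rw [PySem.List.pyRange_one_succ_right (by omega : (0 : Int) ≤ (m : Int)), List.map_append,
        List.reverse_append, ih (by omega),
        show s + 1 - ((m : Int) + 1) = s - m by ring,
        PySem.List.pyRange_one_cons (by omega : (s - (m : Int)) < s + 1), List.map_cons,
        show s - (m : Int) + 1 = s + 1 - (m : Int) by ring]
    simp

-- A's per-match context list equals the mapped sliding window after the current position
lemma pvCtx (last_n : Int) (g : Int → String) (s : Int) (hs : 0 ≤ s) :
    ((((PySem.List.pyRange 0 last_n 1).filter (fun k => decide (0 ≤ s - k))).map
        (fun k => g (s - k))).reverse) = (pvIWin last_n (s + 1)).map g := by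
  rcases (by omega : last_n < 0 ∨ 0 ≤ last_n) with h | h
  · rw [PySem.List.pyRange_one_eq_nil (by omega)]
    unfold pvIWin
    rw [PySem.List.pyRange_one_eq_nil (by omega)]
    rfl
  · rw [pvFilt last_n s hs]
    have hm0 : 0 ≤ min last_n (s + 1) := by omega
    have hmn : ((min last_n (s + 1)).toNat : Int) = min last_n (s + 1) := Int.toNat_of_nonneg hm0
    rw [← hmn, pvRevMap g s _ (by rw [hmn]; omega)]
    unfold pvIWin
    rw [hmn]
    congr 2
    omega

-- one window update (append the position, pop the oldest if over last_n)
lemma pvStepI (last_n : Int) (s : Int) (hs : 0 ≤ s) :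
    (if (((pvIWin last_n s ++ [s]).length : Int) > last_n)
      then (pvIWin last_n s ++ [s]).drop 1 else pvIWin last_n s ++ [s])
      = pvIWin last_n (s + 1) := by
  have happ : pvIWin last_n s ++ [s]
      = PySem.List.pyRange (max 0 (s - max last_n 0)) (s + 1) 1 := by
    unfold pvIWin
    rw [PySem.List.pyRange_one_succ_right (by omega : max 0 (s - max last_n 0) ≤ s)]
  rw [happ, PySem.List.length_pyRange_one,
      (by omega : (((s + 1 - max 0 (s - max last_n 0)).toNat : Int))
        = s + 1 - max 0 (s - max last_n 0))]
  unfold pvIWin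
  rcases (by omega : last_n < s + 1 - max 0 (s - max last_n 0)
      ∨ s + 1 - max 0 (s - max last_n 0) ≤ last_n) with h | h
  · rw [if_pos (by omega), PySem.List.pyRange_one_cons (by omega), List.drop_one, List.tail_cons,
        show max 0 (s - max last_n 0) + 1 = max 0 (s + 1 - max last_n 0) by omega]
  · rw [if_neg (by omega),
        show max 0 (s - max last_n 0) = max 0 (s + 1 - max last_n 0) by omega]

-- the inner dialogue loop: B's windowed fold emits exactly A's per-match contexts
lemma pvInner (state last_n : Int) (g : Int → String) (row : List Int) :
    ∀ (s : Int), 0 ≤ s → ∀ (acc : List String),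
    ((PySem.List.enumerate row s).foldl (pvStepB state last_n g) (pvIWin last_n s, acc)).2
      = (PySem.List.enumerate row s).foldl (pvStepA state last_n g) acc := by
  induction row with
  | nil => intro s _ acc; simp [PySem.List.enumerate_nil]
  | cons label rest ih =>
    intro s hs acc
    rw [PySem.List.enumerate_cons, List.foldl_cons, List.foldl_cons]
    have hstep : pvStepB state last_n g (pvIWin last_n s, acc) (s, label)
        = (pvIWin last_n (s + 1),
           if label == state && g s != "" then
             acc ++ [PySem.Str.join "\n " ((pvIWin last_n (s + 1)).map g)] else acc) := by
      unfold pvStepB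
      simp only []
      rw [pvStepI last_n s hs]
    rw [hstep]
    have hA : pvStepA state last_n g acc (s, label)
        = (if label == state && g s != "" then
             acc ++ [PySem.Str.join "\n " ((pvIWin last_n (s + 1)).map g)] else acc) := by
      unfold pvStepA
      simp only []
      rw [pvCtx last_n g s hs]
      cases hls : (label == state) <;> cases hgs : (g s != "") <;> simp
    rw [← hA]
    exact ih (s + 1) (by omega) _

-- looping over indices of converted_sents (empty label rows contribute nothing) is zip
lemma pvZip {γ : Type} (d : List (List String) → List Int → γ → γ)
    (hnil : ∀ x acc, d x [] acc = acc) :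
    ∀ (cs : List (List (List String))) (cl : List (List Int)) (acc : γ),
    (List.range cs.length).foldl (fun acc k => d (cs.getD k []) (cl.getD k []) acc) acc
      = (cs.zip cl).foldl (fun acc p => d p.1 p.2 acc) acc := by
  intro cs
  induction cs with
  | nil => intro cl acc; simp
  | cons c cs ih =>
    intro cl acc
    rw [List.length_cons, List.range_succ_eq_map, List.foldl_cons, List.foldl_map]
    rcases cl with _ | ⟨b, cl⟩
    · simp only [List.getD_nil, List.getD_cons_zero, List.getD_cons_succ]
      rw [hnil c acc, List.zip_nil_right, List.foldl_nil]
      have h := ih [] acc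
      simp only [List.getD_nil, List.zip_nil_right, List.foldl_nil] at h
      exact h
    · simp only [List.getD_cons_zero, List.getD_cons_succ]
      rw [List.zip_cons_cons, List.foldl_cons]
      exact ih cl (d c b acc)

-- ===== VERDICT (by name: the statement is the Claim_ definition above) =====
theorem get_state_sents_spec : Claim_equal_get_state_sents := by
  intro state cs cl last_n sys_side _ _
  unfold Spec_get_state_sents get_state_sents get_state_sents_alt
  have hinner : ∀ (sents : List (List String)) (labels : List Int) (acc : List String),
      ((PySem.List.enumerate labels 0).foldl
        (pvStepB state last_n (fun t => PySem.List.pyGetD (PySem.List.pyGetD sents t []) sys_side ""))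
        ([], acc)).2
      = (PySem.List.enumerate labels 0).foldl
        (pvStepA state last_n (fun t => PySem.List.pyGetD (PySem.List.pyGetD sents t []) sys_side ""))
        acc := by
    intro sents labels acc
    have h0 : (([] : List Int), acc) = (pvIWin last_n 0, acc) := by rw [pvIWin_zero]
    rw [h0]
    exact pvInner state last_n _ labels 0 (le_refl 0) acc
  rw [List.foldl_ext
    (fun state_sents (sl : List (List String) × List Int) =>
      ((PySem.List.enumerate sl.2 0).foldl
        (pvStepB state last_n (fun t => PySem.List.pyGetD (PySem.List.pyGetD sl.1 t []) sys_side ""))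
        ([], state_sents)).2)
    (fun state_sents (sl : List (List String) × List Int) =>
      (PySem.List.enumerate sl.2 0).foldl
        (pvStepA state last_n (fun t => PySem.List.pyGetD (PySem.List.pyGetD sl.1 t []) sys_side ""))
        state_sents)
    [] (fun acc p _ => hinner p.1 p.2 acc)]
  rw [PySem.List.pyRange_one, List.foldl_map]
  simp only [sub_zero, Int.toNat_natCast, zero_add, PySem.List.pyGetD_natCast]
  exact pvZip
    (fun sents labels acc =>
      (PySem.List.enumerate labels 0).foldl
        (pvStepA state last_n (fun t => PySem.List.pyGetD (PySem.List.pyGetD sents t []) sys_side ""))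
        acc)
    (fun x acc => by simp [PySem.List.enumerate_nil]) cs cl []
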